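-- pv_equiv track=rewrite | github.com/GrimFandango42/VoiceFlow | archive/testing_infrastructure/run_comprehensive_performance_analysis.py | _identify_optimization_priorities
-- ===== SOURCE A (Python) =====
-- from typing import Dict, Any, List
--
-- def _identify_optimization_priorities(performance_grades: Dict[str, str]) -> List[Dict[str, Any]]:
--     """Identify optimization priorities based on performance grades."""
--     priorities = []
--
--     grade_values = {'A': 4, 'B': 3, 'C': 2, 'D': 1, 'F': 0}
--
--     for component, grade in performance_grades.items():
--         grade_value = grade_values.get(grade, 0)
--
--         if grade_value <= 2:  # C grade or below
--             priority = {
--                 'component': component,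
--                 'current_grade': grade,
--                 'priority_level': 'HIGH' if grade_value <= 1 else 'MEDIUM',
--                 'improvement_potential': 'HIGH'
--             }
--             priorities.append(priority)
--         elif grade_value == 3:  # B grade
--             priority = {
--                 'component': component,
--                 'current_grade': grade,
--                 'priority_level': 'MEDIUM',
--                 'improvement_potential': 'MEDIUM'
--             }
--             priorities.append(priority)
--
--     # Sort by priority level and grade
--     priorities.sort(key=lambda x: (
--         0 if x['priority_level'] == 'HIGH' else 1,
--         grade_values.get(x['current_grade'], 0)
--     ))
--
--     return priorities
-- ===== SOURCE B (Python) =====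
-- from typing import Dict, Any, List
--
-- def _identify_optimization_priorities(performance_grades: Dict[str, str]) -> List[Dict[str, Any]]:
--     """Identify optimization priorities by bucket placement instead of sorting."""
--     grade_values = {'A': 4, 'B': 3, 'C': 2, 'D': 1, 'F': 0}
--     # priority template per grade value 0..3 (grade value 4, i.e. 'A', is skipped)
--     templates = {0: ('HIGH', 'HIGH'), 1: ('HIGH', 'HIGH'),
--                  2: ('MEDIUM', 'HIGH'), 3: ('MEDIUM', 'MEDIUM')}
--     buckets = {0: [], 1: [], 2: [], 3: []}
--     for component, grade in performance_grades.items():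
--         gv = grade_values.get(grade, 0)
--         if gv == 4:
--             continue
--         level, potential = templates[gv]
--         buckets[gv].append({
--             'component': component,
--             'current_grade': grade,
--             'priority_level': level,
--             'improvement_potential': potential,
--         })
--     return buckets[0] + buckets[1] + buckets[2] + buckets[3]
-- ===== Notes on version B (the rewrite author's own statement) =====
-- stated objective: alternative
-- what changed: B replaces A's build-then-stable-sort (tuple key of priority level and grade value) by a single pass that places each entry into one of four grade-value buckets and concatenates the buckets, exploiting that the sort key is exactly the grade value 0..3.
import Mathlib
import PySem

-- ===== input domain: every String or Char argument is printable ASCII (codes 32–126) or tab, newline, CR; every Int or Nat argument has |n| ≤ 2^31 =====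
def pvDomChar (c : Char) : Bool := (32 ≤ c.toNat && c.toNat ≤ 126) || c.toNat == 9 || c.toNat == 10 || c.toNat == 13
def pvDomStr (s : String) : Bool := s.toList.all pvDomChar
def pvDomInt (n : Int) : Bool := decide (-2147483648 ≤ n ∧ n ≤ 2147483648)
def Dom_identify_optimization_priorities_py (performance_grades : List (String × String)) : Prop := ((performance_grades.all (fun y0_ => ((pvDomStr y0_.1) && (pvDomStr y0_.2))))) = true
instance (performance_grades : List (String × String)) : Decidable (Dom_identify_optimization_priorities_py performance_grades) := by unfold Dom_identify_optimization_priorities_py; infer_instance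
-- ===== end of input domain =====

-- B replaces A's comparison sort by single-pass bucket placement per grade value (alternative decomposition).

-- ===== PORT A =====
-- the literal dict {'A': 4, 'B': 3, 'C': 2, 'D': 1, 'F': 0} (shared literal of both Pythons)
def pvGradeValues : PySem.Dict String Int :=
  PySem.Dict.ofList [("A", 4), ("B", 3), ("C", 2), ("D", 1), ("F", 0)]

-- port of A: build the priorities list in input order, then stable-sort it by the tuple key
-- (0 if HIGH else 1, grade_values.get(grade, 0)).  x['priority_level'] / x['current_grade'] are
-- ported with getD and an unused default: both keys are always present in the dicts A builds,
-- so getD is exact here (Python's [] would raise only on a missing key).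
def identify_optimization_priorities_py (performance_grades : List (String × String)) : List (List (String × String)) :=
  let priorities := performance_grades.foldl (fun acc cg =>
    let grade_value := pvGradeValues.getD cg.2 0
    if grade_value ≤ 2 then
      acc ++ [[("component", cg.1), ("current_grade", cg.2),
               ("priority_level", if grade_value ≤ 1 then "HIGH" else "MEDIUM"),
               ("improvement_potential", "HIGH")]]
    else if grade_value == 3 then
      acc ++ [[("component", cg.1), ("current_grade", cg.2),
               ("priority_level", "MEDIUM"),
               ("improvement_potential", "MEDIUM")]]
    else acc) []
  PySem.List.sorted2 priorities
    (fun x => if (PySem.Dict.mk x).getD "priority_level" "" == "HIGH" then (0 : Int) else 1)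
    (fun x => pvGradeValues.getD ((PySem.Dict.mk x).getD "current_grade" "") 0)

-- ===== PORT B =====
-- the literal dict templates = {0: (HIGH,HIGH), 1: (HIGH,HIGH), 2: (MEDIUM,HIGH), 3: (MEDIUM,MEDIUM)};
-- looked up with getD and an unused default: gv ∈ {0,1,2,3} whenever it is looked up
def pvTemplates : PySem.Dict Int (String × String) :=
  PySem.Dict.ofList [(0, ("HIGH", "HIGH")), (1, ("HIGH", "HIGH")),
                     (2, ("MEDIUM", "HIGH")), (3, ("MEDIUM", "MEDIUM"))]

-- port of B: the Python dict buckets = {0: [], 1: [], 2: [], 3: []} (fixed keys 0..3) is ported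
-- as a 4-tuple of lists; each entry is appended to its bucket, and the buckets are concatenated.
def identify_optimization_priorities_py_alt (performance_grades : List (String × String)) : List (List (String × String)) :=
  let buckets := performance_grades.foldl
    (fun (b : List (List (String × String)) × List (List (String × String)) ×
              List (List (String × String)) × List (List (String × String))) cg =>
      let gv := pvGradeValues.getD cg.2 0
      if gv == 4 then b
      else
        let t := pvTemplates.getD gv ("", "")
        let e := [("component", cg.1), ("current_grade", cg.2),
                  ("priority_level", t.1), ("improvement_potential", t.2)]
        if gv == 0 then (b.1 ++ [e], b.2.1, b.2.2.1, b.2.2.2)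
        else if gv == 1 then (b.1, b.2.1 ++ [e], b.2.2.1, b.2.2.2)
        else if gv == 2 then (b.1, b.2.1, b.2.2.1 ++ [e], b.2.2.2)
        else (b.1, b.2.1, b.2.2.1, b.2.2.2 ++ [e]))
    ([], [], [], [])
  buckets.1 ++ buckets.2.1 ++ buckets.2.2.1 ++ buckets.2.2.2

-- ===== PRECONDITION & SPEC =====
def Spec_identify_optimization_priorities_py (performance_grades : List (String × String)) (out : List (List (String × String))) : Prop := out = identify_optimization_priorities_py_alt performance_grades
instance (performance_grades : List (String × String)) (out : List (List (String × String))) : Decidable (Spec_identify_optimization_priorities_py performance_grades out) := by unfold Spec_identify_optimization_priorities_py; infer_instance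

-- ===== CLAIM (what is proved, stated in full; the proofs are below) =====
def Claim_equal_identify_optimization_priorities_py : Prop := ∀ (performance_grades : List (String × String)), Dom_identify_optimization_priorities_py performance_grades → Spec_identify_optimization_priorities_py performance_grades (identify_optimization_priorities_py performance_grades)

-- ===== LEMMAS AND PROOFS =====\n\n-- helper: the four possible ranks
def pvRankCase (i : Int) : Prop := i = 0 ∨ i = 1 ∨ i = 2 ∨ i = 3



-- the element dict both programs build for an entry (c, g) that is not skipped
def pvElem (c g : String) : List (String × String) :=
  let gv := pvGradeValues.getD g 0
  [("component", c), ("current_grade", g),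
   ("priority_level", if gv ≤ 1 then "HIGH" else "MEDIUM"),
   ("improvement_potential", if gv ≤ 2 then "HIGH" else "MEDIUM")]

-- A's priorities list (pre-sort), structurally
def pvPrio : List (String × String) → List (List (String × String))
  | [] => []
  | cg :: tl => (if pvGradeValues.getD cg.2 0 ≤ 3 then [pvElem cg.1 cg.2] else []) ++ pvPrio tl

-- B's bucket i, structurally
def pvBkt (i : Int) : List (String × String) → List (List (String × String))
  | [] => []
  | cg :: tl => (if pvGradeValues.getD cg.2 0 = i then [pvElem cg.1 cg.2] else []) ++ pvBkt i tl

-- the rank A sorts by: grade_values.get(x['current_grade'], 0)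
def pvRank (x : List (String × String)) : Int :=
  pvGradeValues.getD ((PySem.Dict.mk x).getD "current_grade" "") 0

-- the grade dict only takes values 0..4
lemma gv_cases (s : String) :
    pvGradeValues.getD s 0 = 0 ∨ pvGradeValues.getD s 0 = 1 ∨ pvGradeValues.getD s 0 = 2 ∨
    pvGradeValues.getD s 0 = 3 ∨ pvGradeValues.getD s 0 = 4 := by
  have h : pvGradeValues = PySem.Dict.mk [("A", 4), ("B", 3), ("C", 2), ("D", 1), ("F", 0)] := by
    decide
  rw [h]
  simp only [PySem.Dict.getD, PySem.Dict.get?_mk_cons]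
  split_ifs <;> simp [PySem.Dict.get?]

lemma elem_grade (c g : String) : (PySem.Dict.mk (pvElem c g)).getD "current_grade" "" = g := by
  simp [pvElem, PySem.Dict.getD, PySem.Dict.get?_mk_cons]

lemma elem_level (c g : String) :
    (PySem.Dict.mk (pvElem c g)).getD "priority_level" ""
      = if pvGradeValues.getD g 0 ≤ 1 then "HIGH" else "MEDIUM" := by
  simp only [pvElem]
  split_ifs <;> simp [PySem.Dict.getD, PySem.Dict.get?_mk_cons]

lemma rank_elem (c g : String) : pvRank (pvElem c g) = pvGradeValues.getD g 0 := by
  simp [pvRank, elem_grade]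

-- A's loop is pvPrio
lemma prio_fold (pg : List (String × String)) (acc : List (List (String × String))) :
    pg.foldl (fun acc cg =>
      let grade_value := pvGradeValues.getD cg.2 0
      if grade_value ≤ 2 then
        acc ++ [[("component", cg.1), ("current_grade", cg.2),
                 ("priority_level", if grade_value ≤ 1 then "HIGH" else "MEDIUM"),
                 ("improvement_potential", "HIGH")]]
      else if grade_value == 3 then
        acc ++ [[("component", cg.1), ("current_grade", cg.2),
                 ("priority_level", "MEDIUM"),
                 ("improvement_potential", "MEDIUM")]]
      else acc) acc = acc ++ pvPrio pg := by
  induction pg generalizing acc with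
  | nil => simp [pvPrio]
  | cons cg tl ih =>
    simp only [List.foldl_cons, pvPrio]
    rw [ih]
    rcases gv_cases cg.2 with h | h | h | h | h <;>
      simp [h, pvElem, List.append_assoc]

-- B's loop fills the four pvBkt buckets
lemma alt_fold (pg : List (String × String))
    (b0 b1 b2 b3 : List (List (String × String))) :
    pg.foldl
      (fun (b : List (List (String × String)) × List (List (String × String)) ×
                List (List (String × String)) × List (List (String × String))) cg =>
        let gv := pvGradeValues.getD cg.2 0
        if gv == 4 then b
        else
          let t := pvTemplates.getD gv ("", "")
          let e := [("component", cg.1), ("current_grade", cg.2),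
                    ("priority_level", t.1), ("improvement_potential", t.2)]
          if gv == 0 then (b.1 ++ [e], b.2.1, b.2.2.1, b.2.2.2)
          else if gv == 1 then (b.1, b.2.1 ++ [e], b.2.2.1, b.2.2.2)
          else if gv == 2 then (b.1, b.2.1, b.2.2.1 ++ [e], b.2.2.2)
          else (b.1, b.2.1, b.2.2.1, b.2.2.2 ++ [e]))
      (b0, b1, b2, b3)
    = (b0 ++ pvBkt 0 pg, b1 ++ pvBkt 1 pg, b2 ++ pvBkt 2 pg, b3 ++ pvBkt 3 pg) := by
  induction pg generalizing b0 b1 b2 b3 with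
  | nil => simp [pvBkt]
  | cons cg tl ih =>
    simp only [List.foldl_cons, pvBkt]
    rw [ih]
    rcases gv_cases cg.2 with h | h | h | h | h <;>
      simp [h, pvElem, pvTemplates, List.append_assoc] <;> constructor <;> decide

-- every element of pvPrio is a pvElem of a non-skipped entry
lemma mem_prio {x : List (String × String)} {pg : List (String × String)}
    (hx : x ∈ pvPrio pg) :
    ∃ c g, pvGradeValues.getD g 0 ≤ 3 ∧ x = pvElem c g := by
  induction pg with
  | nil => simp [pvPrio] at hx
  | cons cg tl ih =>
    simp only [pvPrio, List.mem_append] at hx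
    rcases hx with hx | hx
    · by_cases h : pvGradeValues.getD cg.2 0 ≤ 3
      · simp [h] at hx
        exact ⟨cg.1, cg.2, h, hx⟩
      · simp [h] at hx
    · exact ih hx

-- insertBy into (all-not-before ++ all-before) puts x exactly between the parts
lemma insertBy_bucket {α : Type} (b : α → α → Bool) (x : α) (l1 l2 : List α)
    (h1 : ∀ y ∈ l1, b x y = false) (h2 : ∀ y ∈ l2, b x y = true) :
    PySem.List.insertBy b x (l1 ++ l2) = l1 ++ x :: l2 := by
  induction l1 with
  | nil =>
    cases l2 with
    | nil => simp [PySem.List.insertBy]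
    | cons y ys => simp [PySem.List.insertBy, h2 y (by simp)]
  | cons z l1 ih =>
    have hz : b x z = false := h1 z (by simp)
    simp only [List.cons_append, PySem.List.insertBy, hz]
    simp [ih (fun y hy => h1 y (by simp [hy]))]

-- stable insertion sort with ranks 0..3 = the four rank filters in order
lemma foldl_insertBy_rank {α : Type} (b : α → α → Bool) (r : α → Int) (xs : List α)
    (hb : ∀ a ∈ xs, ∀ c ∈ xs, b a c = decide (r a < r c))
    (hr : ∀ x ∈ xs, 0 ≤ r x ∧ r x ≤ 3) :
    xs.foldl (fun acc x => PySem.List.insertBy b x acc) [] =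
      xs.filter (fun x => r x == 0) ++ xs.filter (fun x => r x == 1) ++
      xs.filter (fun x => r x == 2) ++ xs.filter (fun x => r x == 3) := by
  induction xs using List.reverseRecOn with
  | nil => simp
  | append_singleton ys x ih =>
    have hsub : ∀ y ∈ ys, y ∈ ys ++ [x] := fun y hy => by simp [hy]
    have ih' := ih (fun a ha c hc => hb a (hsub a ha) c (hsub c hc))
      (fun y hy => hr y (hsub y hy))
    have hxmem : x ∈ ys ++ [x] := by simp
    have hbx : ∀ y ∈ ys, b x y = decide (r x < r y) := fun y hy => hb x hxmem y (hsub y hy)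
    have hlow : ∀ y ∈ ys, r y ≤ r x → b x y = false := by
      intro y hy h
      rw [hbx y hy]
      simpa using by omega
    have hhigh : ∀ y ∈ ys, r x < r y → b x y = true := by
      intro y hy h
      rw [hbx y hy]
      simpa using h
    have hfil : ∀ (i : Int), ∀ y ∈ ys.filter (fun z => r z == i), r y = i := by
      intro i y hy
      simpa using (List.of_mem_filter hy)
    have hmemf : ∀ (i : Int), ∀ y ∈ ys.filter (fun z => r z == i), y ∈ ys :=
      fun i y hy => List.mem_of_mem_filter hy
    obtain ⟨hx0, hx3⟩ := hr x hxmem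
    rw [List.foldl_append, List.foldl_cons, List.foldl_nil, ih']
    have hv4 : pvRankCase (r x) := by unfold pvRankCase; omega
    rcases hv4 with hv | hv | hv | hv
    · -- r x = 0
      have hl1 : ∀ y ∈ ys.filter (fun z => r z == 0), b x y = false := by
        intro y hy
        exact hlow y (hmemf 0 y hy) (by have := hfil 0 y hy; omega)
      have hl2 : ∀ y ∈ ys.filter (fun z => r z == 1) ++ (ys.filter (fun z => r z == 2) ++ (ys.filter (fun z => r z == 3))), b x y = true := by
        intro y hy
        simp only [List.mem_append] at hy
        rcases hy with hy | hy | hy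
        · exact hhigh y (hmemf 1 y hy) (by have := hfil 1 y hy; omega)
        · exact hhigh y (hmemf 2 y hy) (by have := hfil 2 y hy; omega)
        · exact hhigh y (hmemf 3 y hy) (by have := hfil 3 y hy; omega)
      have hassoc : ys.filter (fun z => r z == 0) ++ ys.filter (fun z => r z == 1) ++ ys.filter (fun z => r z == 2) ++ ys.filter (fun z => r z == 3) = (ys.filter (fun z => r z == 0)) ++ (ys.filter (fun z => r z == 1) ++ (ys.filter (fun z => r z == 2) ++ (ys.filter (fun z => r z == 3)))) := by
        simp [List.append_assoc]
      rw [hassoc, insertBy_bucket b x _ _ hl1 hl2]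
      simp [List.filter_append, hv, List.append_assoc]
    · -- r x = 1
      have hl1 : ∀ y ∈ ys.filter (fun z => r z == 0) ++ (ys.filter (fun z => r z == 1)), b x y = false := by
        intro y hy
        simp only [List.mem_append] at hy
        rcases hy with hy | hy
        · exact hlow y (hmemf 0 y hy) (by have := hfil 0 y hy; omega)
        · exact hlow y (hmemf 1 y hy) (by have := hfil 1 y hy; omega)
      have hl2 : ∀ y ∈ ys.filter (fun z => r z == 2) ++ (ys.filter (fun z => r z == 3)), b x y = true := by
        intro y hy
        simp only [List.mem_append] at hy
        rcases hy with hy | hy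
        · exact hhigh y (hmemf 2 y hy) (by have := hfil 2 y hy; omega)
        · exact hhigh y (hmemf 3 y hy) (by have := hfil 3 y hy; omega)
      have hassoc : ys.filter (fun z => r z == 0) ++ ys.filter (fun z => r z == 1) ++ ys.filter (fun z => r z == 2) ++ ys.filter (fun z => r z == 3) = (ys.filter (fun z => r z == 0) ++ (ys.filter (fun z => r z == 1))) ++ (ys.filter (fun z => r z == 2) ++ (ys.filter (fun z => r z == 3))) := by
        simp [List.append_assoc]
      rw [hassoc, insertBy_bucket b x _ _ hl1 hl2]
      simp [List.filter_append, hv, List.append_assoc]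
    · -- r x = 2
      have hl1 : ∀ y ∈ ys.filter (fun z => r z == 0) ++ (ys.filter (fun z => r z == 1) ++ (ys.filter (fun z => r z == 2))), b x y = false := by
        intro y hy
        simp only [List.mem_append] at hy
        rcases hy with hy | hy | hy
        · exact hlow y (hmemf 0 y hy) (by have := hfil 0 y hy; omega)
        · exact hlow y (hmemf 1 y hy) (by have := hfil 1 y hy; omega)
        · exact hlow y (hmemf 2 y hy) (by have := hfil 2 y hy; omega)
      have hl2 : ∀ y ∈ ys.filter (fun z => r z == 3), b x y = true := by
        intro y hy
        exact hhigh y (hmemf 3 y hy) (by have := hfil 3 y hy; omega)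
      have hassoc : ys.filter (fun z => r z == 0) ++ ys.filter (fun z => r z == 1) ++ ys.filter (fun z => r z == 2) ++ ys.filter (fun z => r z == 3) = (ys.filter (fun z => r z == 0) ++ (ys.filter (fun z => r z == 1) ++ (ys.filter (fun z => r z == 2)))) ++ (ys.filter (fun z => r z == 3)) := by
        simp [List.append_assoc]
      rw [hassoc, insertBy_bucket b x _ _ hl1 hl2]
      simp [List.filter_append, hv, List.append_assoc]
    · -- r x = 3
      have hl1 : ∀ y ∈ ys.filter (fun z => r z == 0) ++ (ys.filter (fun z => r z == 1) ++ (ys.filter (fun z => r z == 2) ++ (ys.filter (fun z => r z == 3)))), b x y = false := by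
        intro y hy
        simp only [List.mem_append] at hy
        rcases hy with hy | hy | hy | hy
        · exact hlow y (hmemf 0 y hy) (by have := hfil 0 y hy; omega)
        · exact hlow y (hmemf 1 y hy) (by have := hfil 1 y hy; omega)
        · exact hlow y (hmemf 2 y hy) (by have := hfil 2 y hy; omega)
        · exact hlow y (hmemf 3 y hy) (by have := hfil 3 y hy; omega)
      have hl2 : ∀ y ∈ ([] : List α), b x y = true := by
        intro y hy
        simp at hy
      have hassoc : ys.filter (fun z => r z == 0) ++ ys.filter (fun z => r z == 1) ++ ys.filter (fun z => r z == 2) ++ ys.filter (fun z => r z == 3) = (ys.filter (fun z => r z == 0) ++ (ys.filter (fun z => r z == 1) ++ (ys.filter (fun z => r z == 2) ++ (ys.filter (fun z => r z == 3))))) ++ (([] : List α)) := by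
        simp [List.append_assoc]
      rw [hassoc, insertBy_bucket b x _ _ hl1 hl2]
      simp [List.filter_append, hv, List.append_assoc]

-- A's tuple-key comparison, first component
def pvK1 (x : List (String × String)) : Int :=
  if (PySem.Dict.mk x).getD "priority_level" "" == "HIGH" then 0 else 1

-- the sort comparison A uses equals rank comparison on the dicts A builds
lemma lt_elem (ca ga cc gc : String)
    (ha : pvGradeValues.getD ga 0 ≤ 3) (hc : pvGradeValues.getD gc 0 ≤ 3) :
    (decide (pvK1 (pvElem ca ga) < pvK1 (pvElem cc gc)) ||
      (!decide (pvK1 (pvElem cc gc) < pvK1 (pvElem ca ga)) &&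
        decide (pvRank (pvElem ca ga) < pvRank (pvElem cc gc))))
      = decide (pvRank (pvElem ca ga) < pvRank (pvElem cc gc)) := by
  simp only [pvK1, elem_level, rank_elem]
  rcases gv_cases ga with h1 | h1 | h1 | h1 | h1 <;>
    rcases gv_cases gc with h2 | h2 | h2 | h2 | h2 <;>
      simp_all

-- the rank filters of pvPrio are B's buckets
lemma filter_prio (pg : List (String × String)) (i : Int) (hi : i ≤ 3) :
    (pvPrio pg).filter (fun x => pvRank x == i) = pvBkt i pg := by
  induction pg with
  | nil => simp [pvPrio, pvBkt]
  | cons cg tl ih =>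
    simp only [pvPrio, pvBkt, List.filter_append, ih]
    rcases gv_cases cg.2 with h | h | h | h | h <;>
      by_cases hgi : pvGradeValues.getD cg.2 0 = i <;>
        simp_all [rank_elem]

theorem identify_optimization_priorities_py_spec : Claim_equal_identify_optimization_priorities_py := by
  intro pg _
  unfold Spec_identify_optimization_priorities_py
  unfold identify_optimization_priorities_py identify_optimization_priorities_py_alt
  rw [alt_fold pg [] [] [] []]
  simp only [List.nil_append]
  rw [prio_fold pg []]
  simp only [List.nil_append, PySem.List.sorted2]
  simp only [if_neg (by decide : ¬ (false = true))]
  rw [foldl_insertBy_rank _ pvRank (pvPrio pg)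
    (by
      intro a ha c hc
      obtain ⟨ca, ga, hga, rfl⟩ := mem_prio ha
      obtain ⟨cc, gc, hgc, rfl⟩ := mem_prio hc
      simpa [pvK1] using lt_elem ca ga cc gc hga hgc)
    (by
      intro x hx
      obtain ⟨c, g, hg, rfl⟩ := mem_prio hx
      rw [rank_elem]
      rcases gv_cases g with h | h | h | h | h <;> omega)]
  rw [filter_prio pg 0 (by omega), filter_prio pg 1 (by omega),
      filter_prio pg 2 (by omega), filter_prio pg 3 (by omega)]
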